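-- pv_equiv track=rewrite | github.com/Supradin4ik/Test | scripts/progress_test_stage.py | find_batch_completed_column
-- ===== SOURCE A (Python) =====
-- from typing import Iterable
--
-- def find_batch_completed_column(columns: Iterable[str]) -> str | None:
--     columns_list = list(columns)
--     lower_map = {column.lower(): column for column in columns_list}
--
--     priority = [
--         "qty_completed",
--         "completed_qty",
--         "quantity_completed",
--         "qty_done",
--         "done_qty",
--     ]
--     for name in priority:
--         if name in lower_map:
--             return lower_map[name]
--
--     for column in columns_list:
--         lowered = column.lower()
--         if ("qty" in lowered or "quantity" in lowered) and (
--             "completed" in lowered or "done" in lowered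
--         ):
--             return column
--
--     return None
-- ===== SOURCE B (Python) =====
-- def find_batch_completed_column(columns):
--     priority = [
--         "qty_completed",
--         "completed_qty",
--         "quantity_completed",
--         "qty_done",
--         "done_qty",
--     ]
--     prio_index = {name: i for i, name in enumerate(priority)}
--
--     best_idx = len(priority)
--     best_col = None
--     fallback = None
--     for column in columns:
--         lowered = column.lower()
--         idx = prio_index.get(lowered)
--         if idx is not None and idx <= best_idx:
--             best_idx = idx
--             best_col = column
--         if fallback is None and ("qty" in lowered or "quantity" in lowered) and (
--             "completed" in lowered or "done" in lowered
--         ):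
--             fallback = column
--     return best_col if best_col is not None else fallback
-- ===== Notes on version B (the rewrite author's own statement) =====
-- stated objective: alternative
-- what changed: A builds a dict of all lowered columns and then scans the priority list and the columns again; B makes a single pass over the columns keeping the best priority index/column seen so far (last-wins on equal index, matching dict overwrite) and the first fallback match.
import Mathlib
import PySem

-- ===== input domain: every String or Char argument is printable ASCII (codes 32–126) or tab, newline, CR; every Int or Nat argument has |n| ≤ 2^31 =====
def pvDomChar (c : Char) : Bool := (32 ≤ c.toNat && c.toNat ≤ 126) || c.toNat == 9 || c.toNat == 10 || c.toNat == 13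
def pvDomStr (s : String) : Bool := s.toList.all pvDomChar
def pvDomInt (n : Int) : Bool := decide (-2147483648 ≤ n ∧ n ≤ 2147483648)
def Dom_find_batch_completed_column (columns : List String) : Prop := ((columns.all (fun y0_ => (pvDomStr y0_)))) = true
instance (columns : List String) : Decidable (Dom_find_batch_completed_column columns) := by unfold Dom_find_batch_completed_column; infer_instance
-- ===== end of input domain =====

-- B replaces A's two sequential scans (dict of all lowered columns, then the priority
-- list, then a fallback scan) by ONE pass over the columns that keeps the best priority
-- index seen so far and the first fallback match (objective: alternative decomposition).

-- ===== PORT A =====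
def pvPriority : List String :=
  ["qty_completed", "completed_qty", "quantity_completed", "qty_done", "done_qty"]

-- the fallback condition both Pythons write inline
def pvFallbackCond (lowered : String) : Bool :=
  (PySem.Str.isIn "qty" lowered || PySem.Str.isIn "quantity" lowered)
    && (PySem.Str.isIn "completed" lowered || PySem.Str.isIn "done" lowered)

-- A's first loop: `for name in priority: if name in lower_map: return lower_map[name]`
def pvPrioLoop (d : PySem.Dict String String) : List String → Option String
  | [] => none
  | name :: rest => if d.contains name then d.get? name else pvPrioLoop d rest

-- A's second loop: first column matching the fallback condition
def pvFbLoop : List String → Option String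
  | [] => none
  | column :: rest =>
    if pvFallbackCond (PySem.Str.lower column) then some column else pvFbLoop rest

def find_batch_completed_column (columns : List String) : Option String :=
  let lowerMap :=
    columns.foldl (fun d column => d.insert (PySem.Str.lower column) column) PySem.Dict.empty
  match pvPrioLoop lowerMap pvPriority with
  | some v => some v
  | none => pvFbLoop columns

-- ===== PORT B =====
-- {name: i for i, name in enumerate(priority)}
def pvPrioIndex : PySem.Dict String Int :=
  (PySem.List.enumerate pvPriority 0).foldl (fun d p => d.insert p.2 p.1) PySem.Dict.empty

-- one loop iteration of B over state (best_idx, best_col, fallback)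
def pvStep (st : Int × Option String × Option String) (column : String) :
    Int × Option String × Option String :=
  let lowered := PySem.Str.lower column
  let st1 :=
    match pvPrioIndex.get? lowered with
    | some idx => if idx ≤ st.1 then (idx, some column, st.2.2) else st
    | none => st
  if st1.2.2.isNone && pvFallbackCond lowered then (st1.1, st1.2.1, some column) else st1

def find_batch_completed_column_alt (columns : List String) : Option String :=
  let st := columns.foldl pvStep (5, none, none)
  match st.2.1 with
  | some v => some v
  | none => st.2.2

-- ===== PRECONDITION & SPEC =====
def Spec_find_batch_completed_column (columns : List String) (out : Option String) : Prop := out = find_batch_completed_column_alt columns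
instance (columns : List String) (out : Option String) : Decidable (Spec_find_batch_completed_column columns out) := by unfold Spec_find_batch_completed_column; infer_instance

-- ===== CLAIM (what is proved, stated in full; the proofs are below) =====
def Claim_equal_find_batch_completed_column : Prop := ∀ (columns : List String), Dom_find_batch_completed_column columns → Spec_find_batch_completed_column columns (find_batch_completed_column columns)

-- ===== LEMMAS AND PROOFS =====

-- the priority name at index i (proof-side view of pvPriority / pvPrioIndex)
def pvPrioAt (i : Int) : String :=
  if i = 0 then "qty_completed"
  else if i = 1 then "completed_qty"
  else if i = 2 then "quantity_completed"
  else if i = 3 then "qty_done"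
  else if i = 4 then "done_qty"
  else ""

lemma pvPrioIndex_get? (l : String) : pvPrioIndex.get? l =
    if l = "done_qty" then some 4
    else if l = "qty_done" then some 3
    else if l = "quantity_completed" then some 2
    else if l = "completed_qty" then some 1
    else if l = "qty_completed" then some 0
    else none := by
  have h : pvPrioIndex =
      ((((PySem.Dict.empty.insert "qty_completed" (0 : Int)).insert "completed_qty" 1).insert
          "quantity_completed" 2).insert "qty_done" 3).insert "done_qty" 4 := by
    decide
  rw [h]
  simp [PySem.Dict.get?_insert]

lemma pvPrioIndex_none {l : String} (h : pvPrioIndex.get? l = none) :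
    ∀ i : Int, 0 ≤ i → i < 5 → pvPrioAt i ≠ l := by
  rw [pvPrioIndex_get?] at h
  intro i h0 h5 hEq
  interval_cases i <;> simp [pvPrioAt] at hEq <;> simp [← hEq] at h

lemma pvPrioIndex_some {l : String} {j : Int} (h : pvPrioIndex.get? l = some j) :
    0 ≤ j ∧ j < 5 ∧ pvPrioAt j = l ∧
      ∀ i : Int, 0 ≤ i → i < 5 → i ≠ j → pvPrioAt i ≠ l := by
  rw [pvPrioIndex_get?] at h
  split_ifs at h with h1 h2 h3 h4 h5 <;> injection h with hj <;> subst hj <;> subst_vars <;>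
    refine ⟨by norm_num, by norm_num, by simp [pvPrioAt], ?_⟩ <;>
    (intro i h0 h5' hne; interval_cases i <;> simp_all [pvPrioAt])

-- the single-pass invariant: bi is the least priority index whose name occurs (lowered)
-- in the processed prefix (5 if none does), bc the dict's (last-wins) value there
def pvInv (d : PySem.Dict String String) (bi : Int) (bc : Option String) : Prop :=
  0 ≤ bi ∧ bi ≤ 5 ∧
  (∀ i : Int, 0 ≤ i → i < bi → d.get? (pvPrioAt i) = none) ∧
  (bi < 5 → ∃ v, bc = some v ∧ d.get? (pvPrioAt bi) = some v) ∧
  (bi = 5 → bc = none)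

lemma pvPrioLoop_of_inv {d : PySem.Dict String String} {bi : Int} {bc : Option String}
    (h : pvInv d bi bc) : pvPrioLoop d pvPriority = (if bi < 5 then bc else none) := by
  obtain ⟨h0, h5, habs, hhit, hnone⟩ := h
  interval_cases bi
  · obtain ⟨v, rfl, hv⟩ := hhit (by norm_num)
    have e0 : d.get? "qty_completed" = some v := by simpa [pvPrioAt] using hv
    simp [pvPrioLoop, pvPriority, PySem.Dict.contains_eq_isSome_get?, e0]
  · obtain ⟨v, rfl, hv⟩ := hhit (by norm_num)
    have e0 : d.get? "qty_completed" = none := by simpa [pvPrioAt] using habs 0 (by norm_num) (by norm_num)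
    have e1 : d.get? "completed_qty" = some v := by simpa [pvPrioAt] using hv
    simp [pvPrioLoop, pvPriority, PySem.Dict.contains_eq_isSome_get?, e0, e1]
  · obtain ⟨v, rfl, hv⟩ := hhit (by norm_num)
    have e0 : d.get? "qty_completed" = none := by simpa [pvPrioAt] using habs 0 (by norm_num) (by norm_num)
    have e1 : d.get? "completed_qty" = none := by simpa [pvPrioAt] using habs 1 (by norm_num) (by norm_num)
    have e2 : d.get? "quantity_completed" = some v := by simpa [pvPrioAt] using hv
    simp [pvPrioLoop, pvPriority, PySem.Dict.contains_eq_isSome_get?, e0, e1, e2]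
  · obtain ⟨v, rfl, hv⟩ := hhit (by norm_num)
    have e0 : d.get? "qty_completed" = none := by simpa [pvPrioAt] using habs 0 (by norm_num) (by norm_num)
    have e1 : d.get? "completed_qty" = none := by simpa [pvPrioAt] using habs 1 (by norm_num) (by norm_num)
    have e2 : d.get? "quantity_completed" = none := by simpa [pvPrioAt] using habs 2 (by norm_num) (by norm_num)
    have e3 : d.get? "qty_done" = some v := by simpa [pvPrioAt] using hv
    simp [pvPrioLoop, pvPriority, PySem.Dict.contains_eq_isSome_get?, e0, e1, e2, e3]
  · obtain ⟨v, rfl, hv⟩ := hhit (by norm_num)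
    have e0 : d.get? "qty_completed" = none := by simpa [pvPrioAt] using habs 0 (by norm_num) (by norm_num)
    have e1 : d.get? "completed_qty" = none := by simpa [pvPrioAt] using habs 1 (by norm_num) (by norm_num)
    have e2 : d.get? "quantity_completed" = none := by simpa [pvPrioAt] using habs 2 (by norm_num) (by norm_num)
    have e3 : d.get? "qty_done" = none := by simpa [pvPrioAt] using habs 3 (by norm_num) (by norm_num)
    have e4 : d.get? "done_qty" = some v := by simpa [pvPrioAt] using hv
    simp [pvPrioLoop, pvPriority, PySem.Dict.contains_eq_isSome_get?, e0, e1, e2, e3, e4]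
  · have e0 : d.get? "qty_completed" = none := by simpa [pvPrioAt] using habs 0 (by norm_num) (by norm_num)
    have e1 : d.get? "completed_qty" = none := by simpa [pvPrioAt] using habs 1 (by norm_num) (by norm_num)
    have e2 : d.get? "quantity_completed" = none := by simpa [pvPrioAt] using habs 2 (by norm_num) (by norm_num)
    have e3 : d.get? "qty_done" = none := by simpa [pvPrioAt] using habs 3 (by norm_num) (by norm_num)
    have e4 : d.get? "done_qty" = none := by simpa [pvPrioAt] using habs 4 (by norm_num) (by norm_num)
    simp [pvPrioLoop, pvPriority, PySem.Dict.contains_eq_isSome_get?, e0, e1, e2, e3, e4]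

lemma pvOrMatch (x y : Option String) :
    (match x with | some v => some v | none => y) = x.or y := by cases x <;> rfl

lemma pvMain (cols : List String) :
    ∀ (d : PySem.Dict String String) (bi : Int) (bc fb : Option String), pvInv d bi bc →
    (pvPrioLoop (cols.foldl (fun d column => d.insert (PySem.Str.lower column) column) d)
        pvPriority).or (fb.or (pvFbLoop cols))
      = ((cols.foldl pvStep (bi, bc, fb)).2.1).or (cols.foldl pvStep (bi, bc, fb)).2.2 := by
  induction cols with
  | nil =>
    intro d bi bc fb hInv
    rw [List.foldl_nil, List.foldl_nil, pvPrioLoop_of_inv hInv]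
    obtain ⟨h0, h5, habs, hhit, hnone⟩ := hInv
    by_cases hb : bi < 5
    · obtain ⟨v, rfl, hv⟩ := hhit hb
      simp [hb, pvFbLoop]
    · have : bi = 5 := by omega
      simp [hb, hnone this, pvFbLoop]
  | cons c cols ih =>
    intro d bi bc fb hInv
    obtain ⟨h0, h5, habs, hhit, hnone⟩ := hInv
    rw [List.foldl_cons, List.foldl_cons]
    -- the new fallback component after processing c
    have hfb : ∀ (bi' : Int) (bc' : Option String),
        fb.or (pvFbLoop (c :: cols))
          = (if fb.isNone && pvFallbackCond (PySem.Str.lower c) then some c else fb).or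
              (pvFbLoop cols) := by
      intro _ _
      cases fb <;> by_cases hc : pvFallbackCond (PySem.Str.lower c) = true <;>
        simp [pvFbLoop, hc]
    rcases hidx : pvPrioIndex.get? (PySem.Str.lower c) with _ | j
    · -- c's lowered form is not a priority name: best index/column unchanged
      have hne := pvPrioIndex_none hidx
      have hstep : pvStep (bi, bc, fb) c
          = (bi, bc, if fb.isNone && pvFallbackCond (PySem.Str.lower c) then some c else fb) := by
        simp only [pvStep, hidx]
        by_cases hP : (fb.isNone && pvFallbackCond (PySem.Str.lower c)) = true <;> simp [hP]
      have hInv' : pvInv (d.insert (PySem.Str.lower c) c) bi bc := by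
        refine ⟨h0, h5, ?_, ?_, hnone⟩
        · intro i hi0 hib
          rw [PySem.Dict.get?_insert_of_ne _ _ (hne i hi0 (by omega))]
          exact habs i hi0 hib
        · intro hb
          obtain ⟨v, rfl, hv⟩ := hhit hb
          exact ⟨v, rfl, by rw [PySem.Dict.get?_insert_of_ne _ _ (hne bi h0 hb)]; exact hv⟩
      rw [hstep, hfb bi bc]
      exact ih _ bi bc _ hInv'
    · obtain ⟨hj0, hj5, hjat, hjne⟩ := pvPrioIndex_some hidx
      by_cases hle : j ≤ bi
      · -- a new (weakly) best priority hit: take index j, column c (last wins on ties)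
        have hstep : pvStep (bi, bc, fb) c
            = (j, some c, if fb.isNone && pvFallbackCond (PySem.Str.lower c) then some c else fb) := by
          simp only [pvStep, hidx]
          by_cases hP : (fb.isNone && pvFallbackCond (PySem.Str.lower c)) = true <;>
            simp [hP, hle]
        have hInv' : pvInv (d.insert (PySem.Str.lower c) c) j (some c) := by
          refine ⟨hj0, by omega, ?_, ?_, ?_⟩
          · intro i hi0 hij
            rw [PySem.Dict.get?_insert_of_ne _ _ (hjne i hi0 (by omega) (by omega))]
            exact habs i hi0 (by omega)
          · intro _
            exact ⟨c, rfl, by rw [hjat]; exact PySem.Dict.get?_insert_self _ _ _⟩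
          · intro h; omega
        rw [hstep, hfb j (some c)]
        exact ih _ j (some c) _ hInv'
      · -- a priority hit at a worse index: state unchanged (the dict entry is unreachable)
        have hstep : pvStep (bi, bc, fb) c
            = (bi, bc, if fb.isNone && pvFallbackCond (PySem.Str.lower c) then some c else fb) := by
          simp only [pvStep, hidx]
          by_cases hP : (fb.isNone && pvFallbackCond (PySem.Str.lower c)) = true <;>
            simp [hP, hle]
        have hbi5 : bi < 5 := by omega
        have hInv' : pvInv (d.insert (PySem.Str.lower c) c) bi bc := by
          refine ⟨h0, h5, ?_, ?_, fun h => absurd h (by omega)⟩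
          · intro i hi0 hib
            rw [PySem.Dict.get?_insert_of_ne _ _ (hjne i hi0 (by omega) (by omega))]
            exact habs i hi0 hib
          · intro hb
            obtain ⟨v, rfl, hv⟩ := hhit hb
            exact ⟨v, rfl, by
              rw [PySem.Dict.get?_insert_of_ne _ _ (hjne bi h0 hbi5 (by omega))]; exact hv⟩
        rw [hstep, hfb bi bc]
        exact ih _ bi bc _ hInv'

lemma pvA_eq (columns : List String) : find_batch_completed_column columns
    = (pvPrioLoop
        (columns.foldl (fun d column => d.insert (PySem.Str.lower column) column)
          PySem.Dict.empty) pvPriority).or (pvFbLoop columns) := by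
  simp only [find_batch_completed_column]
  exact pvOrMatch _ _

lemma pvB_eq (columns : List String) : find_batch_completed_column_alt columns
    = ((columns.foldl pvStep (5, none, none)).2.1).or
        (columns.foldl pvStep (5, none, none)).2.2 := by
  simp only [find_batch_completed_column_alt]
  exact pvOrMatch _ _

-- ===== VERDICT (by name: the statement is the Claim_ definition above) =====
theorem find_batch_completed_column_spec : Claim_equal_find_batch_completed_column := by
  intro columns _
  unfold Spec_find_batch_completed_column
  rw [pvA_eq, pvB_eq]
  have hInv : pvInv PySem.Dict.empty 5 none := by
    refine ⟨by norm_num, le_refl _, ?_, by norm_num, fun _ => rfl⟩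
    intro i _ _; simp [PySem.Dict.get?_empty]
  have h := pvMain columns PySem.Dict.empty 5 none none hInv
  simpa using h
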